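-- pv_equiv track=rewrite | github.com/eliottcassidy2000/math | 04-computation/walsh_omega_degree.py | edge_index
-- ===== SOURCE A (Python) =====
-- def edge_index(n, i, j):
--     """Get the edge index for pair (i,j) with i<j."""
--     idx = 0
--     for a in range(n):
--         for b in range(a+1, n):
--             if a == i and b == j:
--                 return idx
--             idx += 1
--     return -1
-- ===== SOURCE B (Python) =====
-- def edge_index(n, i, j):
--     """Get the edge index for pair (i,j) with i<j."""
--     if 0 <= i < j < n:
--         return i * n - i * (i + 1) // 2 + (j - i - 1)
--     return -1
-- ===== Notes on version B (the rewrite author's own statement) =====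
-- stated objective: faster
-- what changed: Replaced the nested enumeration of all pairs by a closed-form arithmetic formula i*n - i*(i+1)//2 + (j-i-1) guarded by the validity check 0 <= i < j < n.
import Mathlib
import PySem

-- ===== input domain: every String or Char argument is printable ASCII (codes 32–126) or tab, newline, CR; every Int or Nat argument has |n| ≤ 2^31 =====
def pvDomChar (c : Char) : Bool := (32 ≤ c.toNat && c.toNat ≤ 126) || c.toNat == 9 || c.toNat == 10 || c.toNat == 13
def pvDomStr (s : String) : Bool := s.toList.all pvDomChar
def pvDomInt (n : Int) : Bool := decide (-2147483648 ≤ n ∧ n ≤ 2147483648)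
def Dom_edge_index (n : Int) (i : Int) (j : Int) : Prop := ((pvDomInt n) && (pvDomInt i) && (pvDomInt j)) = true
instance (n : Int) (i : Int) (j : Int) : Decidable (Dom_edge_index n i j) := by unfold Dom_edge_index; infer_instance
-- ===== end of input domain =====

-- B replaces A's O(n^2) nested pair enumeration by a closed-form O(1) formula (asymptotically faster).


-- ===== PORT A =====
-- inner loop: for b in range(a+1, n): if a == i and b == j: return idx (Sum.inl); idx += 1
def edgeInner (i j a : Int) (idx : Int) : List Int → Int ⊕ Int
  | [] => Sum.inr idx
  | b :: bs => if a = i ∧ b = j then Sum.inl idx else edgeInner i j a (idx + 1) bs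

-- outer loop: for a in range(n): … ; return -1 if no early return happened
def edgeOuter (n i j : Int) (idx : Int) : List Int → Int
  | [] => -1
  | a :: as =>
      match edgeInner i j a idx (PySem.List.pyRange (a + 1) n 1) with
      | Sum.inl r => r
      | Sum.inr idx' => edgeOuter n i j idx' as

def edge_index (n : Int) (i : Int) (j : Int) : Int :=
  edgeOuter n i j 0 (PySem.List.pyRange 0 n 1)

-- ===== PORT B =====
def edge_index_alt (n : Int) (i : Int) (j : Int) : Int :=
  if 0 ≤ i ∧ i < j ∧ j < n then
    i * n - PySem.Int.floordiv (i * (i + 1)) 2 + (j - i - 1)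
  else
    -1

-- ===== PRECONDITION & SPEC =====
def Spec_edge_index (n : Int) (i : Int) (j : Int) (out : Int) : Prop := out = edge_index_alt n i j
instance (n : Int) (i : Int) (j : Int) (out : Int) : Decidable (Spec_edge_index n i j out) := by unfold Spec_edge_index; infer_instance

-- ===== CLAIM (what is proved, stated in full; the proofs are below) =====
def Claim_equal_edge_index : Prop := ∀ (n : Int) (i : Int) (j : Int), Dom_edge_index n i j → Spec_edge_index n i j (edge_index n i j)

-- ===== LEMMAS AND PROOFS =====

-- the inner loop never returns early when the row index a differs from i
theorem edgeInner_ne (i j a : Int) (h : a ≠ i) :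
    ∀ (bs : List Int) (idx : Int), edgeInner i j a idx bs = Sum.inr (idx + bs.length) := by
  intro bs
  induction bs with
  | nil => intro idx; simp [edgeInner]
  | cons b bs ih =>
      intro idx
      rw [edgeInner, if_neg (by exact fun hc => h hc.1), ih]
      simp
      omega

-- the inner loop on row i over range(c, n): early return at j when c ≤ j < n, else falls through
theorem edgeInner_eq (n i j : Int) :
    ∀ (k : Nat) (c idx : Int), (n - c).toNat = k →
      edgeInner i j i idx (PySem.List.pyRange c n 1) =
        if c ≤ j ∧ j < n then Sum.inl (idx + (j - c))
        else Sum.inr (idx + ((n - c).toNat : Int)) := by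
  intro k
  induction k with
  | zero =>
      intro c idx hk
      rw [PySem.List.pyRange_one_eq_nil (by omega)]
      rw [if_neg (by omega)]
      simp [edgeInner]
      omega
  | succ k ih =>
      intro c idx hk
      rw [PySem.List.pyRange_one_cons (by omega)]
      rw [edgeInner]
      by_cases hcj : c = j
      · rw [if_pos ⟨rfl, hcj⟩, if_pos (by omega)]
        simp [hcj]
      · rw [if_neg (by exact fun hc => hcj hc.2)]
        rw [ih (c + 1) (idx + 1) (by omega)]
        by_cases hc : c + 1 ≤ j ∧ j < n
        · rw [if_pos hc, if_pos (by omega)]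
          congr 1; omega
        · rw [if_neg hc, if_neg (by omega)]
          congr 1; omega

-- the outer loop from row a0: closed form of the accumulated index
theorem edgeOuter_eq (n i j : Int) :
    ∀ (k : Nat) (a0 idx : Int), (n - a0).toNat = k → 0 ≤ a0 →
      edgeOuter n i j idx (PySem.List.pyRange a0 n 1) =
        if a0 ≤ i ∧ i < j ∧ j < n then
          idx + (i - a0) * n - (i * (i + 1) - a0 * (a0 + 1)) / 2 + (j - i - 1)
        else -1 := by
  intro k
  induction k with
  | zero =>
      intro a0 idx hk ha0
      rw [PySem.List.pyRange_one_eq_nil (by omega)]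
      rw [if_neg (by omega)]
      simp [edgeOuter]
  | succ k ih =>
      intro a0 idx hk ha0
      rw [PySem.List.pyRange_one_cons (by omega)]
      rw [edgeOuter]
      by_cases hai : a0 = i
      · subst hai
        rw [edgeInner_eq n a0 j (n - (a0 + 1)).toNat (a0 + 1) idx rfl]
        by_cases hj : a0 + 1 ≤ j ∧ j < n
        · rw [if_pos hj]
          rw [if_pos (by omega)]
          have h2 : (a0 * (a0 + 1) - a0 * (a0 + 1)) / 2 = 0 := by
            simp
          rw [h2]; ring
        · rw [if_neg hj]
          dsimp only
          rw [ih (a0 + 1) _ (by omega) (by omega)]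
          rw [if_neg (by omega), if_neg (by omega)]
      · rw [edgeInner_ne i j a0 hai]
        dsimp only
        rw [ih (a0 + 1) _ (by omega) (by omega)]
        rw [PySem.List.length_pyRange_one]
        by_cases hc : a0 + 1 ≤ i ∧ i < j ∧ j < n
        · rw [if_pos hc, if_pos (by omega)]
          -- replace the two triangular-number divisions using evenness witnesses
          obtain ⟨p, hp⟩ : Even (i * (i + 1)) := Int.even_mul_succ_self i
          obtain ⟨q, hq⟩ : Even (a0 * (a0 + 1)) := Int.even_mul_succ_self a0
          obtain ⟨r, hr⟩ : Even ((a0 + 1) * (a0 + 2)) := by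
            have h := Int.even_mul_succ_self (a0 + 1)
            have he : (a0 + 1) * (a0 + 1 + 1) = (a0 + 1) * (a0 + 2) := by ring
            rwa [he] at h
          have h1 : (i * (i + 1) - (a0 + 1) * ((a0 + 1) + 1)) / 2 = p - r := by
            have : i * (i + 1) - (a0 + 1) * ((a0 + 1) + 1) = 2 * (p - r) := by
              have : (a0 + 1) * ((a0 + 1) + 1) = (a0 + 1) * (a0 + 2) := by ring
              rw [this, hp, hr]; ring
            rw [this, Int.mul_ediv_cancel_left _ (by norm_num)]
          have h2 : (i * (i + 1) - a0 * (a0 + 1)) / 2 = p - q := by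
            have : i * (i + 1) - a0 * (a0 + 1) = 2 * (p - q) := by rw [hp, hq]; ring
            rw [this, Int.mul_ediv_cancel_left _ (by norm_num)]
          have hrq : r = q + (a0 + 1) := by
            have : 2 * r = 2 * (q + (a0 + 1)) := by
              have := hr; have := hq; nlinarith [hr, hq]
            omega
          rw [h1, h2, hrq]
          have hcast : ((n - (a0 + 1)).toNat : Int) = n - a0 - 1 := by omega
          rw [hcast]; ring
        · rw [if_neg hc, if_neg (by omega)]

-- ===== VERDICT (by name: the statement is the Claim_ definition above) =====
theorem edge_index_spec : Claim_equal_edge_index := by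
  intro n i j _
  unfold Spec_edge_index edge_index edge_index_alt
  rw [edgeOuter_eq n i j (n - 0).toNat 0 0 rfl le_rfl]
  by_cases hc : 0 ≤ i ∧ i < j ∧ j < n
  · rw [if_pos ⟨hc.1, hc.2⟩, if_pos hc]
    rw [PySem.Int.floordiv_eq_ediv_of_pos (by norm_num)]
    ring_nf
  · rw [if_neg (by exact fun h => hc ⟨h.1, h.2⟩), if_neg hc]
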